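-- pv_equiv track=rewrite | github.com/amiralix/adventOfCode2021 | day10.py | find_penalty
-- ===== SOURCE A (Python) =====
-- def find_penalty(list):
--     penalty = 0
--     for counter in range(0,len(list)):
--         if list[counter] == ")":
--             penalty  = penalty  + 3
--         elif list[counter] == "]":
--             penalty  = penalty  + 57
--         elif list[counter] == "}":
--             penalty  = penalty  + 1197
--         elif list[counter] == ">":
--             penalty  = penalty  + 25137
--     return penalty
-- ===== SOURCE B (Python) =====
-- SCORES = {")": 3, "]": 57, "}": 1197, ">": 25137}
--
-- def find_penalty(list):
--     # Divide and conquer: split in half, score halves recursively.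
--     if len(list) == 0:
--         return 0
--     if len(list) == 1:
--         return SCORES.get(list[0], 0)
--     mid = len(list) // 2
--     return find_penalty(list[:mid]) + find_penalty(list[mid:])
-- ===== Notes on version B (the rewrite author's own statement) =====
-- stated objective: alternative
-- what changed: A scans the input index by index with a branch-selected accumulator; B is a divide-and-conquer recursion that splits the list in half, scores a singleton by one dict lookup, and adds the two halves' scores (correct because the penalty sum is additive over concatenation).
import Mathlib
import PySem

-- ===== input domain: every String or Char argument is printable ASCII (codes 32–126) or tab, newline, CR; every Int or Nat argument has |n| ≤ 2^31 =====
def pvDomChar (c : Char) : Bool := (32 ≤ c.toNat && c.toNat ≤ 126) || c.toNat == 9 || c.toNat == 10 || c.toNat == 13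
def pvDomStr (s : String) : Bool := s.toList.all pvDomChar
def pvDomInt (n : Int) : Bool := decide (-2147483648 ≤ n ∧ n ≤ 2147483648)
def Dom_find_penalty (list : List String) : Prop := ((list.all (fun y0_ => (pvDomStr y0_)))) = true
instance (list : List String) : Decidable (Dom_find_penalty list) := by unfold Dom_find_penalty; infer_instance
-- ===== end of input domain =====

-- B replaces A's index-by-index branch-and-add scan with a divide-and-conquer recursion (split in half, dict-lookup at singletons, add the halves); alternative decomposition, same result.


-- ===== PORT A =====
def find_penalty (list : List String) : Int :=
  (PySem.List.pyRange 0 (PySem.List.len list) 1).foldl (fun penalty counter =>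
    if PySem.List.pyGetD list counter "" = ")" then penalty + 3
    else if PySem.List.pyGetD list counter "" = "]" then penalty + 57
    else if PySem.List.pyGetD list counter "" = "}" then penalty + 1197
    else if PySem.List.pyGetD list counter "" = ">" then penalty + 25137
    else penalty) 0

-- ===== PORT B =====
def pvScores : PySem.Dict String Int :=
  PySem.Dict.ofList [(")", 3), ("]", 57), ("}", 1197), (">", 25137)]

def find_penalty_alt (list : List String) : Int :=
  if list.length = 0 then 0
  else if list.length = 1 then pvScores.getD (PySem.List.pyGetD list 0 "") 0
  else
    let mid := PySem.Int.floordiv (list.length : Int) 2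
    find_penalty_alt (PySem.List.slice list none (some mid)) +
      find_penalty_alt (PySem.List.slice list (some mid) none)
termination_by list.length
decreasing_by
  all_goals
    rename_i h0 h1
    have hlen : 2 ≤ list.length := by omega
    have hmid : PySem.Int.floordiv (list.length : Int) 2 = ((list.length / 2 : Nat) : Int) := by
      exact_mod_cast PySem.Int.floordiv_natCast list.length 2
    rw [hmid]
    simp only [PySem.List.slice_to_natCast, PySem.List.slice_from_natCast,
      List.length_take, List.length_drop]
    omega

-- ===== PRECONDITION & SPEC =====
def Spec_find_penalty (list : List String) (out : Int) : Prop := out = find_penalty_alt list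
instance (list : List String) (out : Int) : Decidable (Spec_find_penalty list out) := by unfold Spec_find_penalty; infer_instance

-- ===== CLAIM (what is proved, stated in full; the proofs are below) =====
def Claim_equal_find_penalty : Prop := ∀ (list : List String), Dom_find_penalty list → Spec_find_penalty list (find_penalty list)

-- ===== LEMMAS AND PROOFS =====
-- the common characterisation: total penalty as weighted counts
def pvWeight (l : List String) : Int :=
  3 * (l.count ")" : Int) + 57 * (l.count "]" : Int)
    + 1197 * (l.count "}" : Int) + 25137 * (l.count ">" : Int)

theorem find_penalty_foldl (l : List String) (acc : Int) :
    l.foldl (fun penalty x =>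
      if x = ")" then penalty + 3
      else if x = "]" then penalty + 57
      else if x = "}" then penalty + 1197
      else if x = ">" then penalty + 25137
      else penalty) acc = acc + pvWeight l := by
  induction l generalizing acc with
  | nil => simp [pvWeight]
  | cons h t ih =>
    simp only [List.foldl_cons, ih, pvWeight, List.count_cons]
    split_ifs with h1 h2 h3 h4 <;> simp_all <;> ring

theorem pvWeight_append (a b : List String) : pvWeight (a ++ b) = pvWeight a + pvWeight b := by
  simp [pvWeight, List.count_append]; ring

theorem find_penalty_alt_eq_weight (l : List String) : find_penalty_alt l = pvWeight l := by
  generalize hn : l.length = n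
  induction n using Nat.strong_induction_on generalizing l with
  | _ n ih =>
    subst hn
    rw [find_penalty_alt]
    by_cases h0 : l.length = 0
    · simp [List.length_eq_zero_iff.mp h0, pvWeight]
    · by_cases h1 : l.length = 1
      · obtain ⟨x, hx⟩ := List.length_eq_one_iff.mp h1
        subst hx
        rw [if_neg (by simp), if_pos (by simp)]
        have hx0 : PySem.List.pyGetD [x] 0 "" = x := by
          simp [PySem.List.pyGetD, PySem.List.pyGet?, PySem.List.pyIdx?]
        rw [hx0]
        have hs : pvScores = PySem.Dict.mk [(")", 3), ("]", 57), ("}", 1197), (">", 25137)] := by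
          rfl
        simp only [hs, pvWeight, PySem.Dict.getD, PySem.Dict.get?_mk_cons,
          List.count_cons, List.count_nil]
        split_ifs <;> simp_all [PySem.Dict.get?]
      · have hlen : 2 ≤ l.length := by omega
        have hmid : PySem.Int.floordiv (l.length : Int) 2 = ((l.length / 2 : Nat) : Int) := by
          exact_mod_cast PySem.Int.floordiv_natCast l.length 2
        simp only [h0, h1, if_false, hmid, PySem.List.slice_to_natCast,
          PySem.List.slice_from_natCast]
        rw [ih _ (by simp; omega) _ rfl, ih _ (by simp; omega) _ rfl, ← pvWeight_append,
          List.take_append_drop]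

-- ===== VERDICT (by name: the statement is the Claim_ definition above) =====
theorem find_penalty_spec : Claim_equal_find_penalty := by
  intro l _
  show find_penalty l = find_penalty_alt l
  unfold find_penalty
  rw [PySem.List.foldl_pyRange_zero_pyGetD l ""
    (fun penalty x =>
      if x = ")" then penalty + 3
      else if x = "]" then penalty + 57
      else if x = "}" then penalty + 1197
      else if x = ">" then penalty + 25137
      else penalty) 0]
  rw [find_penalty_foldl, find_penalty_alt_eq_weight]
  ring
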